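-- pv_equiv track=rewrite | github.com/bigbadman-lab/basil-claw | ingest/voice.py | _keep_one_metaphor_sentence
-- ===== SOURCE A (Python) =====
-- METAPHOR_WORDS = [
--     "barnacles", "hull", "nets", "claws", "spines", "realm", "shell", "tide",
--     "harbour", "pincers", "boiling pot", "crustacean", "lobster", "claw",
--     "maritime", "vessel", "anchor", "currents", "waters",
-- ]
--
-- def _contains_metaphor(s: str) -> bool:
--     low = s.lower()
--     return any(w in low for w in METAPHOR_WORDS)
--
-- def _keep_one_metaphor_sentence(sentences: list[str]) -> list[str]:
--     """Keep sentences so that at most one sentence contains a metaphor (first occurrence kept)."""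
--     out = []
--     metaphor_seen = False
--     for s in sentences:
--         if _contains_metaphor(s):
--             if metaphor_seen:
--                 break
--             metaphor_seen = True
--         out.append(s)
--     return out
-- ===== SOURCE B (Python) =====
-- METAPHOR_WORDS = [
--     "barnacles", "hull", "nets", "claws", "spines", "realm", "shell", "tide",
--     "harbour", "pincers", "boiling pot", "crustacean", "lobster", "claw",
--     "maritime", "vessel", "anchor", "currents", "waters",
-- ]
--
-- def _contains_metaphor(s: str) -> bool:
--     low = s.lower()
--     return any(w in low for w in METAPHOR_WORDS)
--
-- def _keep_one_metaphor_sentence(sentences: list[str]) -> list[str]: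
--     """Staged, break-free: compute each sentence's running metaphor count, then
--     keep exactly the sentences whose count is below 2 (counts are monotone, so
--     this filter is the same prefix A's early-exit loop produces)."""
--     counts = []
--     c = 0
--     for s in sentences:
--         c += _contains_metaphor(s)
--         counts.append(c)
--     return [s for s, k in zip(sentences, counts) if k < 2]
-- ===== Notes on version B (the rewrite author's own statement) =====
-- stated objective: alternative
-- what changed: Replaces A's flag-plus-break early-exit accumulator loop with a staged, break-free pipeline: first compute the running metaphor count per sentence, then filter with a comprehension keeping sentences whose count is below 2 (correct because the counts are monotone, so the filtered set is exactly the prefix A keeps).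
import Mathlib
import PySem

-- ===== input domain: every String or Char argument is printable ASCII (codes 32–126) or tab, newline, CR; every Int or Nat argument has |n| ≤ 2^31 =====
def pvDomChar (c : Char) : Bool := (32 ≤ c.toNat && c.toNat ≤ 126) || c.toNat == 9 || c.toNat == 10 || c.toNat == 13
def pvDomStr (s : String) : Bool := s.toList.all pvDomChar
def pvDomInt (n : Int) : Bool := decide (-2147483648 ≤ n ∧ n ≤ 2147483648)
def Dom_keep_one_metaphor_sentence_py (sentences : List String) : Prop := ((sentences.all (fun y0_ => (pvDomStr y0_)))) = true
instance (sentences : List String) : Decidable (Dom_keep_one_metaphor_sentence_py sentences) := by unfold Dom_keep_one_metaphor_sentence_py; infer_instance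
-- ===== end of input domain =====

-- B replaces A's flag-plus-break early-exit loop by a break-free staged pipeline: running metaphor counts, then a filter keeping counts < 2 (objective: alternative).


-- ===== PORT A =====
def metaphorWords : List String :=
  ["barnacles", "hull", "nets", "claws", "spines", "realm", "shell", "tide",
   "harbour", "pincers", "boiling pot", "crustacean", "lobster", "claw",
   "maritime", "vessel", "anchor", "currents", "waters"]

def containsMetaphor (s : String) : Bool :=
  let low := PySem.Str.lower s
  metaphorWords.any (fun w => PySem.Str.isIn w low)

-- the for-loop of A with its 'metaphor_seen' flag and 'break', as structural recursion
def keepLoopA : List String → Bool → List String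
  | [], _ => []
  | s :: rest, seen =>
    if containsMetaphor s then
      if seen then []
      else s :: keepLoopA rest true
    else s :: keepLoopA rest seen

def keep_one_metaphor_sentence_py (sentences : List String) : List String :=
  keepLoopA sentences false

-- ===== PORT B =====
-- B's first stage: the running metaphor count of each sentence (the 'counts' list)
def runningCounts : List String → Nat → List Nat
  | [], _ => []
  | s :: rest, c =>
    let c' := c + (if containsMetaphor s then 1 else 0)
    c' :: runningCounts rest c'

-- B's second stage: the filtering comprehension over zip(sentences, counts)
def keep_one_metaphor_sentence_py_alt (sentences : List String) : List String :=
  ((sentences.zip (runningCounts sentences 0)).filter (fun p => p.2 < 2)).map Prod.fst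

-- ===== PRECONDITION & SPEC =====
def Spec_keep_one_metaphor_sentence_py (sentences : List String) (out : List String) : Prop := out = keep_one_metaphor_sentence_py_alt sentences
instance (sentences : List String) (out : List String) : Decidable (Spec_keep_one_metaphor_sentence_py sentences out) := by unfold Spec_keep_one_metaphor_sentence_py; infer_instance

-- ===== CLAIM (what is proved, stated in full; the proofs are below) =====
def Claim_equal_keep_one_metaphor_sentence_py : Prop := ∀ (sentences : List String), Dom_keep_one_metaphor_sentence_py sentences → Spec_keep_one_metaphor_sentence_py sentences (keep_one_metaphor_sentence_py sentences)

-- ===== LEMMAS AND PROOFS =====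

-- once the running count has reached 2, the filter drops everything (counts are monotone)
theorem filter_counts_big (xs : List String) : ∀ c, 2 ≤ c →
    ((xs.zip (runningCounts xs c)).filter (fun p => p.2 < 2)).map Prod.fst = [] := by
  induction xs with
  | nil => intro c _; simp [runningCounts]
  | cons s rest ih =>
    intro c hc
    simp only [runningCounts, List.zip_cons_cons, List.filter_cons, decide_eq_true_eq]
    have h1 : ¬ (c + (if containsMetaphor s then 1 else 0) < 2) := by split_ifs <;> omega
    rw [if_neg h1]
    exact ih _ (by split_ifs at h1 ⊢ <;> omega)

-- main invariant: with running count c ≤ 1, the filter equals A's loop with seen = (c = 1)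
theorem filter_counts_eq_loop (xs : List String) : ∀ c, c ≤ 1 →
    ((xs.zip (runningCounts xs c)).filter (fun p => p.2 < 2)).map Prod.fst
      = keepLoopA xs (c == 1) := by
  induction xs with
  | nil => intro c _; simp [runningCounts, keepLoopA]
  | cons s rest ih =>
    intro c hc
    simp only [runningCounts, List.zip_cons_cons, List.filter_cons, decide_eq_true_eq, keepLoopA]
    by_cases h : containsMetaphor s
    · simp only [h, if_true]
      interval_cases c
      · rw [if_pos (by norm_num)]
        simpa using ih 1 (by omega)
      · rw [if_neg (by norm_num)]
        simpa using filter_counts_big rest 2 (by omega)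
    · simp only [h, if_false, Bool.false_eq_true]
      rw [if_pos (by omega)]
      simpa using ih c hc

-- ===== VERDICT (by name: the statement is the Claim_ definition above) =====
theorem keep_one_metaphor_sentence_py_spec : Claim_equal_keep_one_metaphor_sentence_py := by
  intro sentences _
  unfold Spec_keep_one_metaphor_sentence_py keep_one_metaphor_sentence_py keep_one_metaphor_sentence_py_alt
  simpa using (filter_counts_eq_loop sentences 0 (by omega)).symm
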